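-- pv_equiv track=rewrite | github.com/gewenyu99/playing-with-snakes | snakes/longestSubArray.py | isValidSubarray
-- ===== SOURCE A (Python) =====
-- def isValidSubarray(subarray):
--     letters = 0
--     numbers = 0
--     for char in subarray:
--         if ord('0') <= ord(char) <= ord('9'):
--             numbers += 1
--         elif ord('a') <= ord(char) <= ord('z'):
--             letters += 1
--         else: return False
--     if letters == numbers:
--         return True
--     return False
-- ===== SOURCE B (Python) =====
-- def isValidSubarray(subarray):
--     if any(not (ord('0') <= ord(c) <= ord('9') or ord('a') <= ord(c) <= ord('z')) for c in subarray):
--         return False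
--     numbers = sum(1 for c in subarray if ord('0') <= ord(c) <= ord('9'))
--     return 2 * numbers == len(subarray)
-- ===== Notes on version B (the rewrite author's own statement) =====
-- stated objective: simpler
-- what changed: Replaced A's fused two-counter early-return loop by a validation pass (any invalid char -> False) plus a digit-counting pass with the closed-form test 2*digits == len.
import Mathlib
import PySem

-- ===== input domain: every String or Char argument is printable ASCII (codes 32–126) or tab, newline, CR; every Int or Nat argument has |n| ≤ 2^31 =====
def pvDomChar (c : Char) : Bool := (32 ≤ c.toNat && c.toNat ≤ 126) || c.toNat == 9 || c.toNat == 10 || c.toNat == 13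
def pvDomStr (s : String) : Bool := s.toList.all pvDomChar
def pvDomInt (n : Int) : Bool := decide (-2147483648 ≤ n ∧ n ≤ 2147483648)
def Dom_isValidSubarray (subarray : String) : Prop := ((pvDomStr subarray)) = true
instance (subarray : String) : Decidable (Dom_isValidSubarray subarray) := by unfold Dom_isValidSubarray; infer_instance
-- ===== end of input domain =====

-- B replaces A's fused two-counter early-return loop by a validation pass plus a
-- digit-counting pass with the closed-form test 2*digits == len (objective: simpler).

-- ===== PORT A =====
-- ord('0') <= ord(char) <= ord('9')
def pvIsDig (c : Char) : Bool := decide (48 ≤ c.toNat ∧ c.toNat ≤ 57)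
-- ord('a') <= ord(char) <= ord('z')
def pvIsLow (c : Char) : Bool := decide (97 ≤ c.toNat ∧ c.toNat ≤ 122)

-- the for-loop with early return, carrying the counters letters, numbers
def isValidSubarrayGo : List Char → Int → Int → Bool
  | [], letters, numbers => letters == numbers
  | c :: cs, letters, numbers =>
    if pvIsDig c then isValidSubarrayGo cs letters (numbers + 1)
    else if pvIsLow c then isValidSubarrayGo cs (letters + 1) numbers
    else false

def isValidSubarray (subarray : String) : Bool :=
  isValidSubarrayGo subarray.toList 0 0

-- ===== PORT B =====
def isValidSubarray_alt (subarray : String) : Bool :=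
  if subarray.toList.any (fun c => !(pvIsDig c || pvIsLow c)) then false
  else 2 * ((subarray.toList.filter pvIsDig).length : Int) == (subarray.toList.length : Int)

-- ===== PRECONDITION & SPEC =====
def Spec_isValidSubarray (subarray : String) (out : Bool) : Prop := out = isValidSubarray_alt subarray
instance (subarray : String) (out : Bool) : Decidable (Spec_isValidSubarray subarray out) := by unfold Spec_isValidSubarray; infer_instance

-- ===== CLAIM (what is proved, stated in full; the proofs are below) =====
def Claim_equal_isValidSubarray : Prop := ∀ (subarray : String), Dom_isValidSubarray subarray → Spec_isValidSubarray subarray (isValidSubarray subarray)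

-- ===== LEMMAS AND PROOFS =====

-- invariant for A's loop: if some char is invalid the loop returns false,
-- otherwise it compares the accumulated counters plus the per-class counts
theorem isValidSubarrayGo_eq (cs : List Char) : ∀ (l n : Int),
    isValidSubarrayGo cs l n =
      if cs.any (fun c => !(pvIsDig c || pvIsLow c)) then false
      else (l + ((cs.filter pvIsLow).length : Int)) == (n + ((cs.filter pvIsDig).length : Int)) := by
  induction cs with
  | nil => intro l n; simp [isValidSubarrayGo]
  | cons c cs ih =>
    intro l n
    by_cases hd : pvIsDig c
    · have hl : pvIsLow c = false := by
        revert hd; simp [pvIsDig, pvIsLow]; omega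
      simp [isValidSubarrayGo, hd, hl, ih]
      have e : n + 1 + ((List.filter pvIsDig cs).length : Int)
          = n + (((List.filter pvIsDig cs).length : Int) + 1) := by ring
      rw [e]
    · by_cases hl : pvIsLow c
      · simp [isValidSubarrayGo, hd, hl, ih]
        have e : l + 1 + ((List.filter pvIsLow cs).length : Int)
            = l + (((List.filter pvIsLow cs).length : Int) + 1) := by ring
        rw [e]
      · simp [isValidSubarrayGo, hd, hl]

theorem filter_split (cs : List Char)
    (h : cs.any (fun c => !(pvIsDig c || pvIsLow c)) = false) :
    (cs.filter pvIsLow).length + (cs.filter pvIsDig).length = cs.length := by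
  induction cs with
  | nil => simp
  | cons c cs ih =>
    simp only [List.any_cons, Bool.or_eq_false_iff] at h
    obtain ⟨hc, hrest⟩ := h
    have := ih hrest
    by_cases hd : pvIsDig c
    · have hl : pvIsLow c = false := by
        revert hd; simp [pvIsDig, pvIsLow]; omega
      simp [hd, hl]; omega
    · have hl : pvIsLow c = true := by
        simp [hd] at hc; exact hc
      simp [hd, hl]; omega

-- ===== VERDICT (by name: the statement is the Claim_ definition above) =====
theorem isValidSubarray_spec : Claim_equal_isValidSubarray := by
  intro s _
  unfold Spec_isValidSubarray isValidSubarray isValidSubarray_alt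
  rw [isValidSubarrayGo_eq]
  by_cases h : s.toList.any (fun c => !(pvIsDig c || pvIsLow c)) = true
  · rw [if_pos h, if_pos h]
  · rw [if_neg h, if_neg h]
    have := filter_split s.toList (by simpa using h)
    rw [Bool.eq_iff_iff]
    simp only [beq_iff_eq]
    omega
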